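-- pv_equiv track=rewrite | github.com/billysams21/SNP_DNA | snpify-backend/algorithms/enhanced_snp_detection.py | _is_repetitive_region
-- ===== SOURCE A (Python) =====
-- def _is_repetitive_region(context: str) -> bool:
--     """Enhanced repetitive region detection"""
--     if len(context) < 6:
--         return False
--
--     # Check for homopolymers (AAA, TTT, etc.)
--     for i in range(len(context) - 2):
--         if context[i] == context[i+1] == context[i+2]:
--             return True
--
--     # Check for dinucleotide repeats (ATATAT, CGCGCG)
--     for i in range(len(context) - 5):
--         if context[i:i+2] == context[i+2:i+4] == context[i+4:i+6]:
--             return True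
--
--     # Check for trinucleotide repeats
--     for i in range(len(context) - 8):
--         if context[i:i+3] == context[i+3:i+6] == context[i+6:i+9]:
--             return True
--
--     return False
-- ===== SOURCE B (Python) =====
-- def _is_repetitive_region(context: str) -> bool:
--     """Run-length scan: for each period k, count consecutive positions p with
--     context[p] == context[p+k]; a run of 2*k such positions is a triple repeat."""
--     n = len(context)
--     if n < 6:
--         return False
--     for k in (1, 2, 3):
--         run = 0
--         for p in range(n - k):
--             if context[p] == context[p + k]:
--                 run += 1
--                 if run == 2 * k:
--                     return True
--             else:
--                 run = 0
--     return False
-- ===== Notes on version B (the rewrite author's own statement) =====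
-- stated objective: alternative
-- what changed: A's three fixed-window scans comparing chars/slices are replaced by a single run-length counter pass per period k: count consecutive positions p with context[p]==context[p+k] and report a repeat once a run reaches 2*k, with no slice construction or window re-comparison.
import Mathlib
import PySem

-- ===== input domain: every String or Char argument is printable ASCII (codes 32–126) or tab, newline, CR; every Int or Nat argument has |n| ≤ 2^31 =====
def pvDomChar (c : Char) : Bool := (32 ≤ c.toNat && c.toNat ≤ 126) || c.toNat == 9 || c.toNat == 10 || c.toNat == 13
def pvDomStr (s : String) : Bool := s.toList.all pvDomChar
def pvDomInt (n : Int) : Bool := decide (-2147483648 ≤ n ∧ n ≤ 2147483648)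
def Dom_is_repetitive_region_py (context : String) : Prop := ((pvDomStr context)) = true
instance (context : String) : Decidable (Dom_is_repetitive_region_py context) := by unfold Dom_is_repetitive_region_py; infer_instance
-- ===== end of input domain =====

-- B replaces A's three slice-window scans by a single run-length counter pass per period (alternative decomposition, same exact result).

-- ===== PORT A =====
-- literal transliteration of A: guard, then three index loops with early return (encoded as List.any)
def is_repetitive_region_py (context : String) : Bool :=
  let s := context.toList
  let n := s.length
  if n < 6 then false
  else if (List.range (n - 2)).any (fun i =>
      PySem.List.pyGet? s (i : Int) == PySem.List.pyGet? s ((i : Int) + 1) &&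
      PySem.List.pyGet? s ((i : Int) + 1) == PySem.List.pyGet? s ((i : Int) + 2)) then true
  else if (List.range (n - 5)).any (fun i =>
      PySem.List.slice s (some (i : Int)) (some ((i : Int) + 2)) ==
        PySem.List.slice s (some ((i : Int) + 2)) (some ((i : Int) + 4)) &&
      PySem.List.slice s (some ((i : Int) + 2)) (some ((i : Int) + 4)) ==
        PySem.List.slice s (some ((i : Int) + 4)) (some ((i : Int) + 6))) then true
  else if (List.range (n - 8)).any (fun i =>
      PySem.List.slice s (some (i : Int)) (some ((i : Int) + 3)) ==
        PySem.List.slice s (some ((i : Int) + 3)) (some ((i : Int) + 6)) &&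
      PySem.List.slice s (some ((i : Int) + 3)) (some ((i : Int) + 6)) ==
        PySem.List.slice s (some ((i : Int) + 6)) (some ((i : Int) + 9))) then true
  else false

-- ===== PORT B =====
-- B's inner loop: positions a, a+1, … (len of them) with current run r of matches; returns true
-- as soon as the run reaches L (= 2*k).  Transcribes Source B's `for p … run` loop (fuel = remaining positions).
def pvRunGo (m : Nat → Bool) (L : Nat) : Nat → Nat → Nat → Bool
  | _, _, 0 => false
  | a, r, len+1 =>
    if m a then
      if r + 1 == L then true else pvRunGo m L (a + 1) (r + 1) len
    else pvRunGo m L (a + 1) 0 len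

def is_repetitive_region_py_alt (context : String) : Bool :=
  let s := context.toList
  let n := s.length
  if n < 6 then false
  else [1, 2, 3].any (fun k => pvRunGo (fun p => s[p]? == s[p + k]?) (2 * k) 0 0 (n - k))

-- ===== PRECONDITION & SPEC =====
def Spec_is_repetitive_region_py (context : String) (out : Bool) : Prop := out = is_repetitive_region_py_alt context
instance (context : String) (out : Bool) : Decidable (Spec_is_repetitive_region_py context out) := by unfold Spec_is_repetitive_region_py; infer_instance

-- ===== CLAIM (what is proved, stated in full; the proofs are below) =====
def Claim_equal_is_repetitive_region_py : Prop := ∀ (context : String), Dom_is_repetitive_region_py context → Spec_is_repetitive_region_py context (is_repetitive_region_py context)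

-- ===== LEMMAS AND PROOFS =====

-- the common characterisation: a triple repeat of period k, i.e. 2*k consecutive match positions
def pvE (s : List Char) (k n : Nat) : Prop :=
  ∃ i, i + 3 * k ≤ n ∧ ∀ d, d < 2 * k → s[i + d]? = s[i + d + k]?

-- crux for B: the run counter finds exactly a window of L consecutive matches
lemma pvRunGo_iff (m : Nat → Bool) (L : Nat) (hL : 0 < L) :
    ∀ len a r, r < L → r ≤ a → (∀ d, d < r → m (a - r + d) = true) →
      (pvRunGo m L a r len = true ↔
        ∃ i, a - r ≤ i ∧ i + L ≤ a + len ∧ ∀ d, d < L → m (i + d) = true) := by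
  intro len
  induction len with
  | zero =>
    intro a r hrL hra _
    simp only [pvRunGo]
    constructor
    · intro h; exact absurd h (by simp)
    · rintro ⟨i, hi1, hi2, _⟩; omega
  | succ len ih =>
    intro a r hrL hra hrun
    simp only [pvRunGo]
    by_cases hm : m a = true
    · rw [if_pos hm]
      by_cases hLr : r + 1 = L
      · rw [if_pos (by simpa using hLr)]
        constructor
        · intro _
          refine ⟨a - r, le_refl _, by omega, ?_⟩
          intro d hd
          by_cases hdr : d < r
          · exact hrun d hdr
          · have e : a - r + d = a := by omega
            rw [e]; exact hm
        · intro _; rfl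
      · rw [if_neg (by simpa using hLr)]
        rw [ih (a + 1) (r + 1) (by omega) (by omega)
          (by intro d hd
              by_cases hdr : d < r
              · have : a + 1 - (r + 1) + d = a - r + d := by omega
                rw [this]; exact hrun d hdr
              · have e : a + 1 - (r + 1) + d = a := by omega
                rw [e]; exact hm)]
        constructor
        · rintro ⟨i, h1, h2, h3⟩
          exact ⟨i, by omega, by omega, h3⟩
        · rintro ⟨i, h1, h2, h3⟩
          exact ⟨i, by omega, by omega, h3⟩
    · rw [if_neg hm]
      rw [ih (a + 1) 0 hL (by omega) (by intro d hd; omega)]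
      constructor
      · rintro ⟨i, h1, h2, h3⟩
        exact ⟨i, by omega, by omega, h3⟩
      · rintro ⟨i, h1, h2, h3⟩
        refine ⟨i, ?_, by omega, h3⟩
        -- i cannot be ≤ a: the window would contain position a (m a = false) or be too short
        by_contra hlt
        push Not at hlt
        have hia : i ≤ a := by omega
        by_cases hend : i + L ≤ a
        · omega
        · have hd : a - i < L := by omega
          have := h3 (a - i) hd
          have hai : i + (a - i) = a := by omega
          rw [hai] at this
          exact hm this

-- B's per-period loop equals pvE
lemma pvRunGo_eq_E (s : List Char) (k : Nat) (hk : 0 < k) (hkn : k ≤ s.length) :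
    (pvRunGo (fun p => s[p]? == s[p + k]?) (2 * k) 0 0 (s.length - k) = true) ↔
      pvE s k s.length := by
  rw [pvRunGo_iff _ _ (by omega) _ 0 0 (by omega) (by omega) (by intro d hd; omega)]
  unfold pvE
  constructor
  · rintro ⟨i, _, h2, h3⟩
    exact ⟨i, by omega, fun d hd => by simpa using h3 d hd⟩
  · rintro ⟨i, h1, h3⟩
    exact ⟨i, by omega, by omega, fun d hd => by simpa using h3 d hd⟩

-- a window of w characters starting at a, as a take/drop of s, equals the one at b
-- iff the characters agree pointwise
lemma pvTakeDrop_eq_iff (s : List Char) (a b w : Nat) (_ha : a + w ≤ s.length) (_hb : b + w ≤ s.length) :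
    ((s.drop a).take w = (s.drop b).take w) ↔ ∀ d, d < w → s[a + d]? = s[b + d]? := by
  constructor
  · intro h d hd
    have h1 : ((s.drop a).take w)[d]? = ((s.drop b).take w)[d]? := by rw [h]
    simpa [List.getElem?_take, List.getElem?_drop, hd] using h1
  · intro h
    apply List.ext_getElem?
    intro d
    by_cases hd : d < w
    · have := h d hd
      simpa [List.getElem?_take, List.getElem?_drop, hd] using this
    · rw [List.getElem?_eq_none, List.getElem?_eq_none] <;>
        simp [List.length_take, List.length_drop] <;> omega

-- A's slice triple at offset i with block size k (k = 2 or 3) equals pvE's window at i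
lemma pvSliceTriple_iff (s : List Char) (k i : Nat) (h : i + 3 * k ≤ s.length) :
    ((s.drop i).take k = (s.drop (i + k)).take k ∧
     (s.drop (i + k)).take k = (s.drop (i + 2 * k)).take k) ↔
      (∀ d, d < 2 * k → s[i + d]? = s[i + d + k]?) := by
  rw [pvTakeDrop_eq_iff s i (i + k) k (by omega) (by omega),
      pvTakeDrop_eq_iff s (i + k) (i + 2 * k) k (by omega) (by omega)]
  constructor
  · rintro ⟨h1, h2⟩ d hd
    by_cases hdk : d < k
    · have := h1 d hdk
      convert this using 2
      omega
    · have hd2 : d - k < k := by omega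
      have := h2 (d - k) hd2
      convert this using 2 <;> omega
  · intro hA
    constructor
    · intro d hd
      have := hA d (by omega)
      convert this using 2
      omega
    · intro d hd
      have := hA (k + d) (by omega)
      convert this using 2 <;> omega

-- ===== VERDICT (by name: the statement is the Claim_ definition above) =====
theorem is_repetitive_region_py_spec : Claim_equal_is_repetitive_region_py := by
  intro context _
  unfold Spec_is_repetitive_region_py
  unfold is_repetitive_region_py is_repetitive_region_py_alt
  dsimp only
  set s := context.toList with hs
  set n := s.length with hn
  by_cases h6 : n < 6
  · simp [h6]
  · rw [if_neg h6, if_neg h6]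
    have hn6 : 6 ≤ n := by omega
    -- A's three loops ↔ pvE 1 / 2 / 3
    have hA1 : ((List.range (n - 2)).any (fun i =>
        PySem.List.pyGet? s (i : Int) == PySem.List.pyGet? s ((i : Int) + 1) &&
        PySem.List.pyGet? s ((i : Int) + 1) == PySem.List.pyGet? s ((i : Int) + 2)) = true) ↔
        pvE s 1 n := by
      rw [List.any_eq_true]
      unfold pvE
      constructor
      · rintro ⟨i, hi, hP⟩
        rw [List.mem_range] at hi
        refine ⟨i, by omega, ?_⟩
        have e1 : ((i : Int) + 1) = ((i + 1 : Nat) : Int) := by push_cast; ring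
        have e2 : ((i : Int) + 2) = ((i + 2 : Nat) : Int) := by push_cast; ring
        rw [e1, e2] at hP
        simp only [PySem.List.pyGet?_natCast, Bool.and_eq_true, beq_iff_eq] at hP
        intro d hd
        interval_cases d
        · simpa using hP.1
        · have := hP.2
          have e : i + 1 + 1 = i + 2 := by ring
          simpa [e] using this
      · rintro ⟨i, hi, hP⟩
        refine ⟨i, by rw [List.mem_range]; omega, ?_⟩
        have e1 : ((i : Int) + 1) = ((i + 1 : Nat) : Int) := by push_cast; ring
        have e2 : ((i : Int) + 2) = ((i + 2 : Nat) : Int) := by push_cast; ring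
        rw [e1, e2]
        simp only [PySem.List.pyGet?_natCast, Bool.and_eq_true, beq_iff_eq]
        refine ⟨by simpa using hP 0 (by omega), ?_⟩
        have := hP 1 (by omega)
        have e : i + 1 + 1 = i + 2 := by ring
        simpa [e] using this
    have hA2 : ((List.range (n - 5)).any (fun i =>
        PySem.List.slice s (some (i : Int)) (some ((i : Int) + 2)) ==
          PySem.List.slice s (some ((i : Int) + 2)) (some ((i : Int) + 4)) &&
        PySem.List.slice s (some ((i : Int) + 2)) (some ((i : Int) + 4)) ==
          PySem.List.slice s (some ((i : Int) + 4)) (some ((i : Int) + 6))) = true) ↔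
        pvE s 2 n := by
      rw [List.any_eq_true]
      unfold pvE
      have key : ∀ i : Nat, i + 6 ≤ n →
          (((PySem.List.slice s (some (i : Int)) (some ((i : Int) + 2)) ==
            PySem.List.slice s (some ((i : Int) + 2)) (some ((i : Int) + 4)) &&
          PySem.List.slice s (some ((i : Int) + 2)) (some ((i : Int) + 4)) ==
            PySem.List.slice s (some ((i : Int) + 4)) (some ((i : Int) + 6))) = true) ↔
          (∀ d, d < 2 * 2 → s[i + d]? = s[i + d + 2]?)) := by
        intro i hi
        have e0 : ((i : Int) + 2) = ((i + 2 : Nat) : Int) := by push_cast; ring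
        have e1 : ((i : Int) + 4) = ((i + 2 : Nat) : Int) + ((2 : Nat) : Int) := by push_cast; ring
        have e2 : ((i : Int) + 4) = ((i + 4 : Nat) : Int) := by push_cast; ring
        have e3 : ((i : Int) + 6) = ((i + 4 : Nat) : Int) + ((2 : Nat) : Int) := by push_cast; ring
        rw [show PySem.List.slice s (some (i : Int)) (some ((i : Int) + 2)) = (s.drop i).take 2 from by
              rw [show ((i : Int) + 2) = ((i : Int) + ((2 : Nat) : Int)) from by push_cast; ring]
              exact PySem.List.slice_natCast_add s i 2,
            show PySem.List.slice s (some ((i : Int) + 2)) (some ((i : Int) + 4)) = (s.drop (i + 2)).take 2 from by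
              rw [e0, e1]; exact PySem.List.slice_natCast_add s (i + 2) 2,
            show PySem.List.slice s (some ((i : Int) + 4)) (some ((i : Int) + 6)) = (s.drop (i + 4)).take 2 from by
              rw [e2, e3]; exact PySem.List.slice_natCast_add s (i + 4) 2]
        rw [Bool.and_eq_true, beq_iff_eq, beq_iff_eq]
        have := pvSliceTriple_iff s 2 i (by omega)
        simpa [show i + 2 * 2 = i + 4 from by ring] using this
      constructor
      · rintro ⟨i, hi, hP⟩
        rw [List.mem_range] at hi
        exact ⟨i, by omega, (key i (by omega)).mp hP⟩
      · rintro ⟨i, hi, hP⟩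
        exact ⟨i, by rw [List.mem_range]; omega, (key i (by omega)).mpr hP⟩
    have hA3 : ((List.range (n - 8)).any (fun i =>
        PySem.List.slice s (some (i : Int)) (some ((i : Int) + 3)) ==
          PySem.List.slice s (some ((i : Int) + 3)) (some ((i : Int) + 6)) &&
        PySem.List.slice s (some ((i : Int) + 3)) (some ((i : Int) + 6)) ==
          PySem.List.slice s (some ((i : Int) + 6)) (some ((i : Int) + 9))) = true) ↔
        pvE s 3 n := by
      rw [List.any_eq_true]
      unfold pvE
      have key : ∀ i : Nat, i + 9 ≤ n →
          (((PySem.List.slice s (some (i : Int)) (some ((i : Int) + 3)) ==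
            PySem.List.slice s (some ((i : Int) + 3)) (some ((i : Int) + 6)) &&
          PySem.List.slice s (some ((i : Int) + 3)) (some ((i : Int) + 6)) ==
            PySem.List.slice s (some ((i : Int) + 6)) (some ((i : Int) + 9))) = true) ↔
          (∀ d, d < 2 * 3 → s[i + d]? = s[i + d + 3]?)) := by
        intro i hi
        have e0 : ((i : Int) + 3) = ((i + 3 : Nat) : Int) := by push_cast; ring
        have e1 : ((i : Int) + 6) = ((i + 3 : Nat) : Int) + ((3 : Nat) : Int) := by push_cast; ring
        have e2 : ((i : Int) + 6) = ((i + 6 : Nat) : Int) := by push_cast; ring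
        have e3 : ((i : Int) + 9) = ((i + 6 : Nat) : Int) + ((3 : Nat) : Int) := by push_cast; ring
        rw [show PySem.List.slice s (some (i : Int)) (some ((i : Int) + 3)) = (s.drop i).take 3 from by
              rw [show ((i : Int) + 3) = ((i : Int) + ((3 : Nat) : Int)) from by push_cast; ring]
              exact PySem.List.slice_natCast_add s i 3,
            show PySem.List.slice s (some ((i : Int) + 3)) (some ((i : Int) + 6)) = (s.drop (i + 3)).take 3 from by
              rw [e0, e1]; exact PySem.List.slice_natCast_add s (i + 3) 3,
            show PySem.List.slice s (some ((i : Int) + 6)) (some ((i : Int) + 9)) = (s.drop (i + 6)).take 3 from by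
              rw [e2, e3]; exact PySem.List.slice_natCast_add s (i + 6) 3]
        rw [Bool.and_eq_true, beq_iff_eq, beq_iff_eq]
        have := pvSliceTriple_iff s 3 i (by omega)
        simpa [show i + 2 * 3 = i + 6 from by ring, show i + 3 * 3 = i + 9 from by ring] using this
      constructor
      · rintro ⟨i, hi, hP⟩
        rw [List.mem_range] at hi
        exact ⟨i, by omega, (key i (by omega)).mp hP⟩
      · rintro ⟨i, hi, hP⟩
        exact ⟨i, by rw [List.mem_range]; omega, (key i (by omega)).mpr hP⟩
    -- B's three runs ↔ pvE 1 / 2 / 3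
    have hB1 := pvRunGo_eq_E s 1 (by omega) (by omega)
    have hB2 := pvRunGo_eq_E s 2 (by omega) (by omega)
    have hB3 := pvRunGo_eq_E s 3 (by omega) (by omega)
    rw [← hn] at hB1 hB2 hB3
    -- reduce both sides to the disjunction pvE 1 ∨ pvE 2 ∨ pvE 3
    simp only [List.any_cons, List.any_nil, Bool.or_false]
    by_cases E1 : pvE s 1 n
    · rw [if_pos (hA1.mpr E1)]
      have := hB1.mpr E1
      simp [this]
    · rw [if_neg (fun h => E1 (hA1.mp h))]
      have b1 : pvRunGo (fun p => s[p]? == s[p + 1]?) (2 * 1) 0 0 (n - 1) = false := by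
        rw [Bool.eq_false_iff]; intro h; exact E1 (hB1.mp h)
      by_cases E2 : pvE s 2 n
      · rw [if_pos (hA2.mpr E2)]
        have := hB2.mpr E2
        simp [this, b1]
      · rw [if_neg (fun h => E2 (hA2.mp h))]
        have b2 : pvRunGo (fun p => s[p]? == s[p + 2]?) (2 * 2) 0 0 (n - 2) = false := by
          rw [Bool.eq_false_iff]; intro h; exact E2 (hB2.mp h)
        by_cases E3 : pvE s 3 n
        · rw [if_pos (hA3.mpr E3)]
          have := hB3.mpr E3
          simp [this, b1, b2]
        · rw [if_neg (fun h => E3 (hA3.mp h))]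
          have b3 : pvRunGo (fun p => s[p]? == s[p + 3]?) (2 * 3) 0 0 (n - 3) = false := by
            rw [Bool.eq_false_iff]; intro h; exact E3 (hB3.mp h)
          simp [b1, b2, b3]
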